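-- pv_equiv track=rewrite | github.com/parasiitism/AlgoDaily | leetcode/1954-minimum-garden-perimeter-to-collect-enough-apples/main.py | minimumPerimeter
-- ===== SOURCE A (Python) =====
-- def minimumPerimeter(neededApples: int) -> int:
--     left = 0
--     right = 2**32
--     while left < right:
--         m = (left + right)//2
--         appleCounts = 2 * (m*(m+1)*(m+1) + m*m*(m+1))
--         if neededApples <= appleCounts:
--             right = m
--         else:
--             left = m + 1
--     return right * 8
-- ===== SOURCE B (Python) =====
-- def minimumPerimeter(neededApples: int) -> int:
--     m = 0
--     while 2 * m * (m + 1) * (2 * m + 1) < neededApples: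
--         m += 1
--     return 8 * m
-- ===== Notes on version B (the rewrite author's own statement) =====
-- stated objective: simpler
-- what changed: Replaces A's binary search over [0, 2^32] with a plain linear forward scan from m = 0 using the factored apple-count formula 2*m*(m+1)*(2*m+1), returning 8*m at the first m that reaches neededApples.
import Mathlib
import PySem

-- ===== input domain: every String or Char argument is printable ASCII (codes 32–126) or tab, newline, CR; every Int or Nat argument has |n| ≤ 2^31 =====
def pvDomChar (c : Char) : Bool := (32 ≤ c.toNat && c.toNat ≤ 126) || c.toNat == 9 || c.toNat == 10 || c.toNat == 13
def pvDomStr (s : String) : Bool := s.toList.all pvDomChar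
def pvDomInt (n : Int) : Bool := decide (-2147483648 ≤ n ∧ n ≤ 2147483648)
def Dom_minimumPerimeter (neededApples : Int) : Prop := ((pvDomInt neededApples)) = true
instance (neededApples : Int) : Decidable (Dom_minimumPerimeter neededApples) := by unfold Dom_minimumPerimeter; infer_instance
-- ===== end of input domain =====

-- B replaces A's binary search over [0, 2^32] by a plain linear scan from m = 0
-- with the factored count 2*m*(m+1)*(2*m+1); objective: simpler.

-- ===== PORT A =====
-- A's while-loop: binary search on [left, right); midpoint by Python's //.
-- The fuel argument only makes the recursion total: 2^32 + 1 steps always suffice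
-- (the gap right - left shrinks by at least 1 per iteration), so it never runs out.
def pvALoop (neededApples : Int) (fuel : Nat) (left right : Int) : Int :=
  match fuel with
  | 0 => right
  | fuel + 1 =>
    if left < right then
      let m := PySem.Int.floordiv (left + right) 2
      let appleCounts := 2 * (m * (m + 1) * (m + 1) + m * m * (m + 1))
      if neededApples ≤ appleCounts then pvALoop neededApples fuel left m
      else pvALoop neededApples fuel (m + 1) right
    else right

def minimumPerimeter (neededApples : Int) : Int :=
  pvALoop neededApples (2 ^ 32 + 1) 0 (2 ^ 32) * 8

-- ===== PORT B =====
-- B's while-loop; m only takes values 0,1,2,…, so it is a Nat here.  The fuel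
-- argument only makes the recursion total: neededApples.toNat steps always suffice
-- (the loop keeps running only while m < neededApples), so it never runs out.
def pvBLoop (neededApples : Int) (fuel m : Nat) : Nat :=
  match fuel with
  | 0 => m
  | fuel + 1 =>
    if 2 * (m : Int) * ((m : Int) + 1) * (2 * (m : Int) + 1) < neededApples then
      pvBLoop neededApples fuel (m + 1)
    else m

def minimumPerimeter_alt (neededApples : Int) : Int :=
  8 * (pvBLoop neededApples neededApples.toNat 0 : Int)

-- ===== PRECONDITION & SPEC =====
def Spec_minimumPerimeter (neededApples : Int) (out : Int) : Prop := out = minimumPerimeter_alt neededApples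
instance (neededApples : Int) (out : Int) : Decidable (Spec_minimumPerimeter neededApples out) := by unfold Spec_minimumPerimeter; infer_instance

-- ===== CLAIM (what is proved, stated in full; the proofs are below) =====
def Claim_equal_minimumPerimeter : Prop := ∀ (neededApples : Int), Dom_minimumPerimeter neededApples → Spec_minimumPerimeter neededApples (minimumPerimeter neededApples)

-- ===== LEMMAS AND PROOFS =====

-- A's apple count (= 4k^3 + 6k^2 + 2k); B's factored formula coincides by ring.
def pvApples (k : Int) : Int := 2 * (k * (k + 1) * (k + 1) + k * k * (k + 1))

theorem pvApples_mono {a b : Int} (ha : 0 ≤ a) (hab : a ≤ b) : pvApples a ≤ pvApples b := by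
  unfold pvApples
  nlinarith [mul_nonneg ha (sub_nonneg.mpr hab), sq_nonneg (a + b), sq_nonneg a, sq_nonneg b,
    mul_nonneg (mul_nonneg ha ha) (sub_nonneg.mpr hab)]

theorem pvApples_ge_self {m : Nat} : (m : Int) ≤ pvApples m := by
  unfold pvApples
  nlinarith [Int.natCast_nonneg m, mul_nonneg (Int.natCast_nonneg m) (Int.natCast_nonneg m),
    mul_nonneg (mul_nonneg (Int.natCast_nonneg m) (Int.natCast_nonneg m)) (Int.natCast_nonneg m)]

-- B's loop returns the least m' ≥ m with n ≤ apples m', provided the fuel covers n - m.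
theorem pvBLoop_spec (n : Int) (fuel : Nat) : ∀ m : Nat, n ≤ (m : Int) + fuel →
    m ≤ pvBLoop n fuel m ∧ n ≤ pvApples (pvBLoop n fuel m) ∧
      ∀ k : Nat, m ≤ k → k < pvBLoop n fuel m → pvApples k < n := by
  induction fuel with
  | zero =>
    intro m hm
    simp only [pvBLoop]
    refine ⟨le_refl _, le_trans (by exact_mod_cast hm) pvApples_ge_self, by omega⟩
  | succ fuel ih =>
    intro m hm
    simp only [pvBLoop]
    split
    · rename_i h
      obtain ⟨h1, h2, h3⟩ := ih (m + 1) (by push_cast; push_cast at hm; omega)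
      refine ⟨by omega, h2, ?_⟩
      intro k hk1 hk2
      rcases Nat.eq_or_lt_of_le hk1 with rfl | hk
      · unfold pvApples; nlinarith
      · exact h3 k hk hk2
    · rename_i h
      refine ⟨le_refl _, ?_, by omega⟩
      unfold pvApples; nlinarith [not_lt.mp h]

-- A's binary search maintains: everything below left fails, right succeeds; enough
-- fuel (> gap) means the loop ends with left = right = the least solution.
theorem pvALoop_spec (n : Int) (fuel : Nat) : ∀ l r : Int, (r - l).toNat < fuel → 0 ≤ l → l ≤ r →
    (∀ k : Int, 0 ≤ k → k < l → pvApples k < n) → n ≤ pvApples r →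
    n ≤ pvApples (pvALoop n fuel l r) ∧
      (∀ k : Int, 0 ≤ k → k < pvALoop n fuel l r → pvApples k < n) ∧
      0 ≤ pvALoop n fuel l r := by
  induction fuel with
  | zero => intro l r hf; omega
  | succ fuel ih =>
    intro l r hf hl hlr hinv hr
    simp only [pvALoop]
    split
    · rename_i h
      have hm := PySem.Int.floordiv_eq_ediv_of_pos (a := l + r) (b := 2) (by omega)
      have hmb : l ≤ PySem.Int.floordiv (l + r) 2 ∧ PySem.Int.floordiv (l + r) 2 < r := by
        rw [hm]; omega
      split
      · rename_i hif
        exact ih l _ (by omega) hl (by omega) hinv (by simpa [pvApples] using hif)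
      · rename_i hif
        refine ih _ r (by omega) (by omega) (by omega) ?_ hr
        intro k hk0 hk
        rcases lt_or_ge k l with hkl | hkl
        · exact hinv k hk0 hkl
        · calc pvApples k ≤ pvApples (PySem.Int.floordiv (l + r) 2) :=
                pvApples_mono hk0 (by omega)
            _ < n := by simp [pvApples] at hif ⊢; omega
    · rename_i h
      have : l = r := by omega
      exact ⟨hr, fun k hk0 hk => hinv k hk0 (by omega), by omega⟩

-- the least-solution characterisation is unique
theorem pvLeast_unique {n a b : Int} (ha0 : 0 ≤ a) (hb0 : 0 ≤ b)
    (ha1 : n ≤ pvApples a) (ha2 : ∀ k : Int, 0 ≤ k → k < a → pvApples k < n)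
    (hb1 : n ≤ pvApples b) (hb2 : ∀ k : Int, 0 ≤ k → k < b → pvApples k < n) : a = b := by
  rcases lt_trichotomy a b with h | h | h
  · exact absurd hb2 (by push Not; exact ⟨a, ha0, h, ha1⟩)
  · exact h
  · exact absurd ha2 (by push Not; exact ⟨b, hb0, h, hb1⟩)

-- ===== VERDICT (by name: the statement is the Claim_ definition above) =====
theorem minimumPerimeter_spec : Claim_equal_minimumPerimeter := by
  intro n hdom
  have hdom' : n ≤ 2147483648 := by
    simp [Dom_minimumPerimeter, pvDomInt] at hdom; omega
  have hr : n ≤ pvApples (2 ^ 32) := by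
    unfold pvApples; norm_num; omega
  obtain ⟨hA1, hA2, hA0⟩ :=
    pvALoop_spec n (2 ^ 32 + 1) 0 (2 ^ 32) (by norm_num) (le_refl 0) (by norm_num)
      (by intro k hk0 hk; omega) hr
  obtain ⟨hB0, hB1, hB2⟩ := pvBLoop_spec n n.toNat 0 (by omega)
  have hEq : pvALoop n (2 ^ 32 + 1) 0 (2 ^ 32) = (pvBLoop n n.toNat 0 : Int) := by
    apply pvLeast_unique hA0 (Int.natCast_nonneg _) hA1 hA2 hB1
    intro k hk0 hk
    have := hB2 k.toNat (Nat.zero_le _) (by omega)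
    have hkk : ((k.toNat : Int)) = k := by omega
    rwa [hkk] at this
  show _ = _
  unfold minimumPerimeter minimumPerimeter_alt
  rw [hEq]; ring
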